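-- pv_equiv track=rewrite | github.com/tawbury/trends-analyzer | src/batch/human_review_export.py | _priority_score_buckets
-- ===== SOURCE A (Python) =====
-- def _priority_score_buckets(rows: list[dict[str, str]]) -> dict[str, int]:
--     buckets = {
--         "0": 0,
--         "1_39": 0,
--         "40_59": 0,
--         "60_99": 0,
--         "100_plus": 0,
--     }
--     for row in rows:
--         score = int(row.get("priority_score") or 0)
--         if score <= 0:
--             buckets["0"] += 1
--         elif score < 40:
--             buckets["1_39"] += 1
--         elif score < 60:
--             buckets["40_59"] += 1
--         elif score < 100:
--             buckets["60_99"] += 1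
--         else:
--             buckets["100_plus"] += 1
--     return buckets
-- ===== SOURCE B (Python) =====
-- def _priority_score_buckets(rows: list[dict[str, str]]) -> dict[str, int]:
--     # Staged computation: cumulative counts below each threshold, buckets as differences.
--     scores = [int(row.get("priority_score") or 0) for row in rows]
--     below = [sum(1 for s in scores if s < t) for t in (1, 40, 60, 100)]
--     return {
--         "0": below[0],
--         "1_39": below[1] - below[0],
--         "40_59": below[2] - below[1],
--         "60_99": below[3] - below[2],
--         "100_plus": len(scores) - below[3],
--     }
-- ===== Notes on version B (the rewrite author's own statement) =====
-- stated objective: alternative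
-- what changed: Replaces the per-row five-way if/elif dispatch with staged passes: extract the score list, compute cumulative counts of scores below each threshold (1,40,60,100), and obtain every bucket as a difference of adjacent cumulative counts; no row is ever assigned a bucket.
import Mathlib
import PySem

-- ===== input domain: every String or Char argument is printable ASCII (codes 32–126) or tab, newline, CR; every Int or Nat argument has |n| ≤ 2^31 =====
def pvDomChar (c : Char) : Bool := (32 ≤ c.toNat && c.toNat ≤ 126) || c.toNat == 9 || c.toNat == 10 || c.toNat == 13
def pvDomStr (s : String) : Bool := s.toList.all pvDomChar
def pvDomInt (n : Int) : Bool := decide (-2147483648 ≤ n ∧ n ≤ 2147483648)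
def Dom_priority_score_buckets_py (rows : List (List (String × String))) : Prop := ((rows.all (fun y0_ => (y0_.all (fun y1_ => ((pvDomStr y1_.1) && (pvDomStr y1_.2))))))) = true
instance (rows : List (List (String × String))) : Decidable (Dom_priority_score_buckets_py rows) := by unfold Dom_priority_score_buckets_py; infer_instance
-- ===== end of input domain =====

-- B replaces A's per-row if/elif bucket dispatch by staged passes: cumulative
-- below-threshold counts, buckets as their differences (alternative; same cost; return value only).

-- ===== PORT A =====
-- score = int(row.get("priority_score") or 0), identical in both Pythons; `or 0` makes a missing/empty value 0.
-- Outside Pre_ (nonempty non-int-like value) Python raises ValueError; the port then takes 0 via getD.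
def pvScoreA (row : List (String × String)) : Int :=
  match (PySem.Dict.mk row).get? "priority_score" with
  | none => 0
  | some s => if s = "" then 0 else (PySem.Int.ofStr? s).getD 0

-- the initial dict literal of A
def pvInitA : PySem.Dict String Int :=
  ((((PySem.Dict.empty.insert "0" 0).insert "1_39" 0).insert "40_59" 0).insert "60_99" 0).insert "100_plus" 0

def priority_score_buckets_py (rows : List (List (String × String))) : List (String × Int) :=
  (rows.foldl (fun b row =>
    let score := pvScoreA row
    if score ≤ 0 then b.modify "0" 0 (· + 1)
    else if score < 40 then b.modify "1_39" 0 (· + 1)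
    else if score < 60 then b.modify "40_59" 0 (· + 1)
    else if score < 100 then b.modify "60_99" 0 (· + 1)
    else b.modify "100_plus" 0 (· + 1)) pvInitA).items

-- ===== PORT B =====
-- sum(1 for s in scores if s < t)
def pvBelow (scores : List Int) (t : Int) : Int :=
  scores.foldl (fun acc s => if s < t then acc + 1 else acc) 0

def priority_score_buckets_py_alt (rows : List (List (String × String))) : List (String × Int) :=
  let scores := rows.map pvScoreA
  let below := ([1, 40, 60, 100] : List Int).map (pvBelow scores)
  [("0", below.getD 0 0),
   ("1_39", below.getD 1 0 - below.getD 0 0),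
   ("40_59", below.getD 2 0 - below.getD 1 0),
   ("60_99", below.getD 3 0 - below.getD 2 0),
   ("100_plus", (scores.length : Int) - below.getD 3 0)]

-- ===== PRECONDITION & SPEC =====
-- Pre_ excludes rows whose "priority_score" value is a nonempty string int() cannot parse:
-- both Pythons raise ValueError there (PySem.Int.ofStr? = none).
def Pre_priority_score_buckets_py (rows : List (List (String × String))) : Prop :=
  (rows.all (fun row =>
    match (PySem.Dict.mk row).get? "priority_score" with
    | none => true
    | some s => s == "" || (PySem.Int.ofStr? s).isSome)) = true
instance (rows : List (List (String × String))) : Decidable (Pre_priority_score_buckets_py rows) := by unfold Pre_priority_score_buckets_py; infer_instance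

def pvWitness_priority_score_buckets_py : (List (List (String × String))) :=
  [[("priority_score", "42")], [("name", "x")], [("priority_score", "")]]

def Spec_priority_score_buckets_py (rows : List (List (String × String))) (out : List (String × Int)) : Prop := out = priority_score_buckets_py_alt rows
instance (rows : List (List (String × String))) (out : List (String × Int)) : Decidable (Spec_priority_score_buckets_py rows out) := by unfold Spec_priority_score_buckets_py; infer_instance

-- ===== CLAIM (what is proved, stated in full; the proofs are below) =====
def Claim_equal_priority_score_buckets_py : Prop := ∀ (rows : List (List (String × String))), Dom_priority_score_buckets_py rows → Pre_priority_score_buckets_py rows → Spec_priority_score_buckets_py rows (priority_score_buckets_py rows)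

-- ===== LEMMAS AND PROOFS =====

-- the five-key dict that A's fold maintains
def pvDict5 (a b c d e : Int) : PySem.Dict String Int :=
  PySem.Dict.mk [("0", a), ("1_39", b), ("40_59", c), ("60_99", d), ("100_plus", e)]

lemma pvBelow_eq (t : Int) (xs : List Int) (n : Int) :
    xs.foldl (fun acc s => if s < t then acc + 1 else acc) n =
      n + (xs.countP (fun s => s < t) : Int) := by
  induction xs generalizing n with
  | nil => simp
  | cons x xs ih =>
    simp only [List.foldl_cons, List.countP_cons, ih]
    by_cases h : x < t
    · simp [h]; omega
    · simp [h]

lemma pvFoldA (rows : List (List (String × String))) (a b c d e : Int) :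
    rows.foldl (fun b row =>
      let score := pvScoreA row
      if score ≤ 0 then b.modify "0" 0 (· + 1)
      else if score < 40 then b.modify "1_39" 0 (· + 1)
      else if score < 60 then b.modify "40_59" 0 (· + 1)
      else if score < 100 then b.modify "60_99" 0 (· + 1)
      else b.modify "100_plus" 0 (· + 1)) (pvDict5 a b c d e) =
    pvDict5 (a + (rows.countP (fun r => pvScoreA r ≤ 0) : Int))
            (b + (rows.countP (fun r => 0 < pvScoreA r ∧ pvScoreA r < 40) : Int))
            (c + (rows.countP (fun r => 40 ≤ pvScoreA r ∧ pvScoreA r < 60) : Int))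
            (d + (rows.countP (fun r => 60 ≤ pvScoreA r ∧ pvScoreA r < 100) : Int))
            (e + (rows.countP (fun r => 100 ≤ pvScoreA r) : Int)) := by
  induction rows generalizing a b c d e with
  | nil => simp
  | cons r rows ih =>
    simp only [List.foldl_cons, List.countP_cons]
    by_cases h1 : pvScoreA r ≤ 0
    · have : (pvDict5 a b c d e).modify "0" 0 (· + 1) = pvDict5 (a + 1) b c d e := by
        simp [pvDict5, PySem.Dict.modify, PySem.Dict.insert, PySem.Dict.getD, PySem.Dict.get?, PySem.Dict.contains]
      simp only [h1, if_pos]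
      rw [this, ih]
      have h2 : ¬ (0 < pvScoreA r ∧ pvScoreA r < 40) := by omega
      have h3 : ¬ (40 ≤ pvScoreA r ∧ pvScoreA r < 60) := by omega
      have h4 : ¬ (60 ≤ pvScoreA r ∧ pvScoreA r < 100) := by omega
      have h5 : ¬ (100 ≤ pvScoreA r) := by omega
      simp [h2, h3, h4, h5, pvDict5]
      ring
    · by_cases h2 : pvScoreA r < 40
      · have : (pvDict5 a b c d e).modify "1_39" 0 (· + 1) = pvDict5 a (b + 1) c d e := by
          simp [pvDict5, PySem.Dict.modify, PySem.Dict.insert, PySem.Dict.getD, PySem.Dict.get?, PySem.Dict.contains]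
        simp only [h1, h2, if_neg, if_pos, not_false_iff]
        rw [this, ih]
        have g2 : (0 < pvScoreA r ∧ pvScoreA r < 40) := by omega
        have g3 : ¬ (40 ≤ pvScoreA r ∧ pvScoreA r < 60) := by omega
        have g4 : ¬ (60 ≤ pvScoreA r ∧ pvScoreA r < 100) := by omega
        have g5 : ¬ (100 ≤ pvScoreA r) := by omega
        simp [g2, g3, g4, g5, pvDict5]
        ring
      · by_cases h3 : pvScoreA r < 60
        · have : (pvDict5 a b c d e).modify "40_59" 0 (· + 1) = pvDict5 a b (c + 1) d e := by
            simp [pvDict5, PySem.Dict.modify, PySem.Dict.insert, PySem.Dict.getD, PySem.Dict.get?, PySem.Dict.contains]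
          simp only [h1, h2, h3, if_neg, if_pos, not_false_iff]
          rw [this, ih]
          have g2 : ¬ (0 < pvScoreA r ∧ pvScoreA r < 40) := by omega
          have g3 : (40 ≤ pvScoreA r ∧ pvScoreA r < 60) := by omega
          have g4 : ¬ (60 ≤ pvScoreA r ∧ pvScoreA r < 100) := by omega
          have g5 : ¬ (100 ≤ pvScoreA r) := by omega
          simp [g3, g4, g5, pvDict5]
          ring
        · by_cases h4 : pvScoreA r < 100
          · have : (pvDict5 a b c d e).modify "60_99" 0 (· + 1) = pvDict5 a b c (d + 1) e := by
              simp [pvDict5, PySem.Dict.modify, PySem.Dict.insert, PySem.Dict.getD, PySem.Dict.get?, PySem.Dict.contains]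
            simp only [h1, h2, h3, h4, if_neg, if_pos, not_false_iff]
            rw [this, ih]
            have g2 : ¬ (0 < pvScoreA r ∧ pvScoreA r < 40) := by omega
            have g3 : ¬ (40 ≤ pvScoreA r ∧ pvScoreA r < 60) := by omega
            have g4 : (60 ≤ pvScoreA r ∧ pvScoreA r < 100) := by omega
            have g5 : ¬ (100 ≤ pvScoreA r) := by omega
            simp [g4, g5, pvDict5]
            ring
          · have : (pvDict5 a b c d e).modify "100_plus" 0 (· + 1) = pvDict5 a b c d (e + 1) := by
              simp [pvDict5, PySem.Dict.modify, PySem.Dict.insert, PySem.Dict.getD, PySem.Dict.get?, PySem.Dict.contains]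
            simp only [h1, h2, h3, h4, if_neg, not_false_iff]
            rw [this, ih]
            have g2 : ¬ (0 < pvScoreA r ∧ pvScoreA r < 40) := by omega
            have g3 : ¬ (40 ≤ pvScoreA r ∧ pvScoreA r < 60) := by omega
            have g4 : ¬ (60 ≤ pvScoreA r ∧ pvScoreA r < 100) := by omega
            have g5 : (100 ≤ pvScoreA r) := by omega
            simp [g5, pvDict5]
            ring

lemma pvCountP_split (u v : Int) (h : u ≤ v) (xs : List Int) :
    xs.countP (fun s => s < v) =
      xs.countP (fun s => s < u) + xs.countP (fun s => u ≤ s ∧ s < v) := by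
  induction xs with
  | nil => simp
  | cons x xs ih =>
    simp only [List.countP_cons, ih]
    by_cases h1 : x < u <;> by_cases h2 : x < v <;> by_cases h3 : u ≤ x <;>
      simp [h1, h2, h3] <;> omega

lemma pvCountP_compl (v : Int) (xs : List Int) :
    xs.countP (fun s => v ≤ s) = xs.length - xs.countP (fun s => s < v) ∧
      xs.countP (fun s => s < v) ≤ xs.length := by
  induction xs with
  | nil => simp
  | cons x xs ih =>
    simp only [List.countP_cons, List.length_cons]
    by_cases h : x < v <;> simp [h, show v ≤ x ↔ ¬ x < v by omega] <;> omega

-- ===== VERDICT (by name: the statement is the Claim_ definition above) =====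
theorem priority_score_buckets_py_spec : Claim_equal_priority_score_buckets_py := by
  intro rows _ _
  unfold Spec_priority_score_buckets_py priority_score_buckets_py priority_score_buckets_py_alt
  have hinit : pvInitA = pvDict5 0 0 0 0 0 := by decide
  rw [hinit, pvFoldA]
  simp only [pvBelow, List.map, List.getD, List.getElem?_cons_zero, List.getElem?_cons_succ,
    Option.getD_some, pvBelow_eq, zero_add, pvDict5]
  have m0 := pvCountP_split 1 40 (by norm_num) (rows.map pvScoreA)
  have m1 := pvCountP_split 40 60 (by norm_num) (rows.map pvScoreA)
  have m2 := pvCountP_split 60 100 (by norm_num) (rows.map pvScoreA)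
  have m3 := pvCountP_compl 100 (rows.map pvScoreA)
  simp only [List.countP_map, Function.comp_def] at m0 m1 m2 m3 ⊢
  have e0 : rows.countP (fun r => pvScoreA r ≤ 0) = rows.countP (fun r => pvScoreA r < 1) := by
    apply List.countP_congr; intro r _; simp; omega
  have e1 : rows.countP (fun r => 0 < pvScoreA r ∧ pvScoreA r < 40)
      = rows.countP (fun r => 1 ≤ pvScoreA r ∧ pvScoreA r < 40) := by
    apply List.countP_congr; intro r _; simp; omega
  simp only [List.length_map] at m3
  simp only [List.length_map, List.cons.injEq, Prod.mk.injEq, true_and, and_true]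
  rw [e0, e1]
  refine ⟨?_, ?_, ?_, ?_, ?_⟩ <;> omega
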